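-- pv_equiv track=rewrite | github.com/MichaelWehar/FourCornersProblem | python/primary_implementation_case_1011.py | createNextRightMap
-- ===== SOURCE A (Python) =====
-- def createNextRightMap(m, n, matrix):
--     nextOneRight = [None for _ in range(m * n)]
--     for i in range(m):
--         # fact: before a row is traversed, no 1s have been found yet
--         foundOneYet = False
--         # fact: before a row is traversed, because no 1s have been found yet,
--         # the index of the previous 1 found is NULL
--         prevEntry = [None, None]
--         # for each element of a row:
--         for j in range(n):
--             nextOneRight[i * n + j] = -1
--             # if a 1 is encountered in row i:
--             if matrix[i][j] == True:
--                 # if a 1 has previously been encountered in row i: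
--                 if foundOneYet:
--                     # recall the stored index of the previous 1
--                     prevRowIndex = prevEntry[0]
--                     prevColIndex = prevEntry[1]
--                     # map the index of the current 1 to the index of the previous 1
--                     nextOneRight[prevRowIndex * n + prevColIndex] = j
--                     # store the index of the current 1
--                     prevEntry = [i, j]
--                 # if the current 1 is the first to be detected during a traversal:
--                 else:
--                     # note that a 1 has previously been encountered in row i
--                     foundOneYet = True
--                     # store the index of the current 1
--                     prevEntry = [i, j]
--     return nextOneRight
-- ===== SOURCE B (Python) =====
-- def createNextRightMap(m, n, matrix):
--     # Scan each row right-to-left, carrying the column of the most recently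
--     # seen 1; builds each row block directly, no back-patching/found flag.
--     out = []
--     for i in range(m):
--         rowRes = []
--         last = -1
--         for j in range(n - 1, -1, -1):
--             if matrix[i][j] == True:
--                 rowRes = [last] + rowRes
--                 last = j
--             else:
--                 rowRes = [-1] + rowRes
--         out += rowRes
--     return out
-- ===== Notes on version B (the rewrite author's own statement) =====
-- stated objective: simpler
-- what changed: B scans each row right-to-left carrying the column of the most recently seen 1 and emits each cell's answer directly, replacing A's left-to-right pass with a found-flag, a stored previous index and deferred back-patching into a preallocated flat array.
-- outside the precondition, e.g. on createNextRightMap(-2, -2, []): A returns [None, None, None, None], B returns []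
import Mathlib
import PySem

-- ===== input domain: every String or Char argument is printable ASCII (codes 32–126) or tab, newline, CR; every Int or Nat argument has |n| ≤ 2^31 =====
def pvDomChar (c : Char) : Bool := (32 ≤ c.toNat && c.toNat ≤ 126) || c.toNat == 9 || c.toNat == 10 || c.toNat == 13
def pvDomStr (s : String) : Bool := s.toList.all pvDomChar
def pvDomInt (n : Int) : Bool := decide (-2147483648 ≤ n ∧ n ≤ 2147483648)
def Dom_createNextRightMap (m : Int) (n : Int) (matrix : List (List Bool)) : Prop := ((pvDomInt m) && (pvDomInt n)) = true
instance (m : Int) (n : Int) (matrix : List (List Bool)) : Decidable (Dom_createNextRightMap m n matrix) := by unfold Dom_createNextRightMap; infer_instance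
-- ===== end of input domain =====

-- B replaces A's left-to-right pass with found-flag and deferred back-patching by a
-- right-to-left scan per row carrying the last seen 1's column (objective: simpler).

-- ===== PORT A =====
-- Python A reads matrix[i][j] (raises when out of range) and returns a list that its own
-- loops fully overwrite; the port reads via a default (.getD) and strips the Options with
-- a final getD 0 — under Pre_ every read is in range and every cell was written, so
-- neither default value is ever observed.
-- the body of A's inner 'for j' loop, step for step
def aStep (matrix : List (List Bool)) (n : Int) (i : Int)
    (st : List (Option Int) × Bool × Option Int × Option Int) (j : Int) :
    List (Option Int) × Bool × Option Int × Option Int :=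
  let arr1 := st.1.set (i * n + j).toNat (some (-1))
  if (PySem.List.pyGet? ((PySem.List.pyGet? matrix i).getD []) j).getD false = true then
    if st.2.1 then
      let prevRowIndex := st.2.2.1.getD 0
      let prevColIndex := st.2.2.2.getD 0
      (arr1.set (prevRowIndex * n + prevColIndex).toNat (some j), true, some i, some j)
    else
      (arr1, true, some i, some j)
  else
    (arr1, st.2.1, st.2.2)

-- the body of A's outer 'for i' loop: foundOneYet := False, prevEntry := [None, None], then the j loop
def aRow (matrix : List (List Bool)) (n : Int) (arr : List (Option Int)) (i : Int) :
    List (Option Int) :=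
  ((PySem.List.pyRange 0 n 1).foldl (aStep matrix n i) (arr, false, none, none)).1

def createNextRightMap (m : Int) (n : Int) (matrix : List (List Bool)) : List Int :=
  ((PySem.List.pyRange 0 m 1).foldl (aRow matrix n)
      (List.replicate (m * n).toNat (none : Option Int))).map (fun v => v.getD 0)

-- ===== PORT B =====
-- Source B's inner loop 'for j in range(n-1, -1, -1)' with the prepend 'rowRes = [v] + rowRes',
-- unrolled as recursion on the number of iterations done (k columns from the right);
-- the pair is (last, rowRes).
def altRowGo (matrix : List (List Bool)) (i : Int) (n : Int) : Nat → Int × List Int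
  | 0 => (-1, [])
  | k + 1 =>
    let p := altRowGo matrix i n k
    let j : Int := n - (k + 1)
    if (PySem.List.pyGet? ((PySem.List.pyGet? matrix i).getD []) j).getD false = true then
      (j, p.1 :: p.2)
    else
      (p.1, (-1) :: p.2)

def createNextRightMap_alt (m : Int) (n : Int) (matrix : List (List Bool)) : List Int :=
  (PySem.List.pyRange 0 m 1).foldl (fun out i => out ++ (altRowGo matrix i n n.toNat).2) []

-- ===== PRECONDITION & SPEC =====
-- Pre_ excludes (a) inputs where Python A raises IndexError (0 < m, 0 < n but matrix has
-- fewer than m rows or a needed row shorter than n) and (b) m < 0 ∧ n < 0, where A returns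
-- a list of None — not a value of type List Int.
def Pre_createNextRightMap (m : Int) (n : Int) (matrix : List (List Bool)) : Prop :=
  (0 ≤ m ∨ 0 ≤ n) ∧
    (0 < m → 0 < n →
      m ≤ (matrix.length : Int) ∧ ∀ row ∈ matrix.take m.toNat, n ≤ (row.length : Int))
instance (m : Int) (n : Int) (matrix : List (List Bool)) :
    Decidable (Pre_createNextRightMap m n matrix) := by
  unfold Pre_createNextRightMap; infer_instance

def pvWitness_createNextRightMap : Int × Int × List (List Bool) :=
  (2, 2, [[true, false], [false, true]])

def Spec_createNextRightMap (m : Int) (n : Int) (matrix : List (List Bool)) (out : List Int) : Prop :=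
  out = createNextRightMap_alt m n matrix
instance (m : Int) (n : Int) (matrix : List (List Bool)) (out : List Int) :
    Decidable (Spec_createNextRightMap m n matrix out) := by
  unfold Spec_createNextRightMap; infer_instance

-- ===== CLAIM (what is proved, stated in full; the proofs are below) =====
def Claim_equal_createNextRightMap : Prop :=
  ∀ (m : Int) (n : Int) (matrix : List (List Bool)), Dom_createNextRightMap m n matrix →
    Pre_createNextRightMap m n matrix →
    Spec_createNextRightMap m n matrix (createNextRightMap m n matrix)

-- ===== LEMMAS AND PROOFS =====

-- the cell read both ports perform, as a function of a Nat column
def cellOf (matrix : List (List Bool)) (i : Int) (c : Nat) : Bool :=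
  (PySem.List.pyGet? ((PySem.List.pyGet? matrix i).getD []) (c : Int)).getD false

-- first index in [a, b) where cell holds, else -1
def firstIn (cell : Nat → Bool) (a b : Nat) : Int :=
  if _h : a < b then (if cell a then (a : Int) else firstIn cell (a + 1) b) else -1
termination_by b - a

-- the intended value at column c of a row scanned up to (exclusive) b
def pVal (cell : Nat → Bool) (b c : Nat) : Int :=
  if cell c then firstIn cell (c + 1) b else -1

-- last index < j where cell holds
def lastIn (cell : Nat → Bool) : Nat → Option Nat
  | 0 => none
  | j + 1 => if cell j then some j else lastIn cell j

def prevEnc (i : Int) : Option Nat → Option Int × Option Int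
  | none => (none, none)
  | some c => (some i, some c)

-- one row of the common specification, as Option values (A side) resp. Ints
def rowSpecO (matrix : List (List Bool)) (i : Int) (nt : Nat) : List (Option Int) :=
  (List.range nt).map (fun c => some (pVal (cellOf matrix i) nt c))

theorem firstIn_eq_nil (cell : Nat → Bool) (a b : Nat) (h : b ≤ a) : firstIn cell a b = -1 := by
  rw [firstIn]; rw [dif_neg (by omega)]

theorem firstIn_eq_neg_one_iff (cell : Nat → Bool) (a b : Nat) :
    firstIn cell a b = -1 ↔ ∀ c, a ≤ c → c < b → cell c = false := by
  fun_induction firstIn cell a b with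
  | case1 a h hc =>
      constructor
      · intro he; omega
      · intro hall; rw [hall a le_rfl h] at hc; exact absurd hc (by simp)
  | case2 a h hc ih =>
      rw [ih]
      constructor
      · intro hall c hc1 hc2
        rcases Nat.eq_or_lt_of_le hc1 with rfl | hlt
        · simpa using hc
        · exact hall c hlt hc2
      · intro hall c hc1 hc2; exact hall c (by omega) hc2
  | case3 a h => simp; intro c hc1 hc2; omega

theorem firstIn_succ_right (cell : Nat → Bool) (a b : Nat) (h : a ≤ b) :
    firstIn cell a (b + 1) =
      if firstIn cell a b = -1 then (if cell b then (b : Int) else -1) else firstIn cell a b := by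
  fun_induction firstIn cell a b with
  | case1 a h hc =>
      rw [firstIn, dif_pos (by omega : a < b + 1), if_pos hc]
      have : (a : Int) ≠ -1 := by omega
      rw [if_neg this]
  | case2 a h hc ih =>
      rw [firstIn, dif_pos (by omega : a < b + 1), if_neg (by simpa using hc)]
      exact ih (by omega)
  | case3 a h =>
      have ha : a = b := by omega
      subst ha
      rw [if_pos rfl, firstIn, dif_pos (by omega : a < a + 1)]
      by_cases hc : cell a
      · rw [if_pos hc, if_pos hc]
      · rw [if_neg hc, if_neg hc, firstIn_eq_nil _ _ _ (le_refl (a+1))]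

theorem lastIn_eq_none_iff (cell : Nat → Bool) (j : Nat) :
    lastIn cell j = none ↔ ∀ c, c < j → cell c = false := by
  induction j with
  | zero => simp [lastIn]
  | succ j ih =>
      rw [lastIn]
      by_cases hc : cell j
      · rw [if_pos hc]
        simp only [reduceCtorEq, false_iff, not_forall]
        exact ⟨j, by omega, by simp [hc]⟩
      · rw [if_neg hc, ih]
        constructor
        · intro hall c hcj
          rcases Nat.lt_succ_iff_lt_or_eq.mp hcj with h | rfl
          · exact hall c h
          · simpa using hc
        · intro hall c hcj; exact hall c (by omega)

theorem lastIn_eq_some (cell : Nat → Bool) (j c : Nat) (h : lastIn cell j = some c) :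
    cell c = true ∧ c < j ∧ ∀ d, c < d → d < j → cell d = false := by
  induction j with
  | zero => simp [lastIn] at h
  | succ j ih =>
      rw [lastIn] at h
      by_cases hc : cell j
      · rw [if_pos hc] at h
        obtain rfl : j = c := by simpa using h
        exact ⟨hc, by omega, fun d h1 h2 => by omega⟩
      · rw [if_neg hc] at h
        obtain ⟨h1, h2, h3⟩ := ih h
        refine ⟨h1, by omega, fun d hd1 hd2 => ?_⟩
        rcases Nat.lt_succ_iff_lt_or_eq.mp hd2 with hd | rfl
        · exact h3 d hd1 hd
        · simpa using hc

theorem set_map_range {α : Type} (f : Nat → α) (j pc : Nat) (v : α) (_h : pc < j) :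
    ((List.range j).map f).set pc v
      = (List.range j).map (fun c => if c = pc then v else f c) := by
  apply List.ext_getElem
  · simp
  · intro k h1 h2
    simp only [List.getElem_set, List.getElem_map, List.getElem_range] at *
    by_cases hk : pc = k
    · subst hk; simp
    · rw [if_neg hk, if_neg (fun hh => hk hh.symm)]

theorem set_map_range_append {α : Type} (f : Nat → α) (j pc : Nat) (v : α) (rest : List α)
    (h : pc < j) :
    ((List.range j).map f ++ rest).set pc v
      = (List.range j).map (fun c => if c = pc then v else f c) ++ rest := by
  rw [List.set_append_left _ _ (by simpa using h), set_map_range f j pc v h]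

-- pVal is unchanged at columns < j when the scan is extended by one non-patched column
theorem pVal_succ_eq (cell : Nat → Bool) (j c : Nat) (hc : c < j)
    (h : cell j = false ∨ lastIn cell j = none ∨ (lastIn cell j ≠ some c)) :
    pVal cell (j + 1) c = pVal cell j c := by
  unfold pVal
  by_cases hcc : cell c
  · rw [if_pos hcc, if_pos hcc, firstIn_succ_right _ _ _ (by omega)]
    rcases h with hj | hnone | hne
    · rw [hj]
      split
      · next hfi => rw [hfi]; simp
      · rfl
    · -- no cell below j at all, contradicting cell c with c < j
      rw [lastIn_eq_none_iff] at hnone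
      rw [hnone c hc] at hcc; exact absurd hcc (by simp)
    · by_cases hfi : firstIn cell (c + 1) j = -1
      · -- then no 1 in (c, j), so c is the last 1 below j: lastIn cell j = some c
        exfalso
        rw [firstIn_eq_neg_one_iff] at hfi
        apply hne
        -- show lastIn cell j = some c
        cases hl : lastIn cell j with
        | none => rw [lastIn_eq_none_iff] at hl; rw [hl c hc] at hcc; exact absurd hcc (by simp)
        | some d =>
            obtain ⟨hd1, hd2, hd3⟩ := lastIn_eq_some cell j d hl
            congr 1
            rcases Nat.lt_trichotomy c d with h1 | rfl | h1
            · rw [hfi d (by omega) hd2] at hd1; exact absurd hd1 (by simp)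
            · rfl
            · rw [hd3 c h1 hc] at hcc; exact absurd hcc (by simp)
      · rw [if_neg hfi]
  · rw [if_neg hcc, if_neg hcc]

theorem pVal_succ_patch (cell : Nat → Bool) (j pc : Nat) (hj : cell j = true)
    (h : lastIn cell j = some pc) : pVal cell (j + 1) pc = (j : Int) := by
  obtain ⟨h1, h2, h3⟩ := lastIn_eq_some cell j pc h
  unfold pVal
  rw [if_pos h1, firstIn_succ_right _ _ _ (by omega)]
  have hfi : firstIn cell (pc + 1) j = -1 := by
    rw [firstIn_eq_neg_one_iff]; intro d hd1 hd2; exact h3 d (by omega) hd2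
  rw [if_pos hfi, if_pos hj]

-- B's row recursion computes (first 1 of the scanned suffix, spec values of the suffix)
theorem bRow_spec (matrix : List (List Bool)) (i : Int) (n : Int) (k : Nat)
    (hk : k ≤ n.toNat) :
    altRowGo matrix i n k
      = (firstIn (cellOf matrix i) (n.toNat - k) n.toNat,
         (List.range' (n.toNat - k) k).map (pVal (cellOf matrix i) n.toNat)) := by
  induction k with
  | zero =>
      rw [altRowGo, firstIn_eq_nil _ _ _ (by omega)]
      simp
  | succ k ih =>
      rw [altRowGo, ih (by omega)]
      have hs : n - ((k : Int) + 1) = ((n.toNat - (k + 1) : Nat) : Int) := by omega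
      have hrange : List.range' (n.toNat - (k + 1)) (k + 1)
          = (n.toNat - (k + 1)) :: List.range' (n.toNat - k) k := by
        have : n.toNat - k = (n.toNat - (k + 1)) + 1 := by omega
        rw [this, List.range'_succ]
      set s : Nat := n.toNat - (k + 1) with hsdef
      have hcell : (PySem.List.pyGet? ((PySem.List.pyGet? matrix i).getD [])
          (n - ((k : Int) + 1))).getD false = cellOf matrix i s := by
        rw [hs, cellOf]
      simp only [hcell, hrange, List.map_cons]
      by_cases hc : cellOf matrix i s
      · rw [if_pos hc]
        have hfs : firstIn (cellOf matrix i) s n.toNat = (s : Int) := by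
          rw [firstIn, dif_pos (by omega), if_pos hc]
        have hpv : pVal (cellOf matrix i) n.toNat s
            = firstIn (cellOf matrix i) (s + 1) n.toNat := by
          rw [pVal, if_pos hc]
        have hsk : s + 1 = n.toNat - k := by omega
        rw [hfs, hpv, hs, hsk]
      · rw [if_neg hc]
        have hfs : firstIn (cellOf matrix i) s n.toNat
            = firstIn (cellOf matrix i) (s + 1) n.toNat := by
          rw [firstIn, dif_pos (by omega), if_neg hc]
        have hpv : pVal (cellOf matrix i) n.toNat s = -1 := by
          rw [pVal, if_neg hc]
        have hsk : s + 1 = n.toNat - k := by omega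
        rw [hfs, hpv, hsk]

-- A's inner loop, as surgery on the i-th block of the array
theorem aRow_inner (matrix : List (List Bool)) (n i : Int) (hn : 0 ≤ n) (hi : 0 ≤ i)
    (pre block post : List (Option Int)) (hpre : pre.length = i.toNat * n.toNat)
    (hblock : block.length = n.toNat) (j : Nat) (hj : j ≤ n.toNat) :
    (PySem.List.pyRange 0 (j : Int) 1).foldl (aStep matrix n i)
        (pre ++ block ++ post, false, none, none)
      = (pre ++ (((List.range j).map (fun c => some (pVal (cellOf matrix i) j c)))
            ++ block.drop j) ++ post,
         (lastIn (cellOf matrix i) j).isSome, prevEnc i (lastIn (cellOf matrix i) j)) := by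
  have hin : i * n = (pre.length : Int) := by
    rw [hpre]
    have h1 : ((i.toNat * n.toNat : Nat) : Int) = (i.toNat : Int) * (n.toNat : Int) := by
      push_cast; ring
    rw [h1, Int.toNat_of_nonneg hi, Int.toNat_of_nonneg hn]
  induction j with
  | zero =>
      rw [show ((0 : Nat) : Int) = 0 from rfl, PySem.List.pyRange_one_eq_nil le_rfl]
      simp [lastIn, prevEnc]
  | succ j ih =>
      have hjn : j < n.toNat := by omega
      have hc1 : ((j + 1 : Nat) : Int) = (j : Int) + 1 := by push_cast; ring
      rw [hc1, PySem.List.pyRange_one_succ_right (by positivity), List.foldl_append,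
        ih (by omega)]
      simp only [List.foldl_cons, List.foldl_nil]
      have hidx : (i * n + ((j : Nat) : Int)).toNat = pre.length + j := by rw [hin]; omega
      have hMlen : ((List.range j).map (fun c => some (pVal (cellOf matrix i) j c))).length
          = j := by simp
      have hsplit : block.drop j = block[j]'(by omega) :: block.drop (j + 1) :=
        List.drop_eq_getElem_cons (by omega)
      simp only [aStep]
      rw [show (PySem.List.pyGet? ((PySem.List.pyGet? matrix i).getD [])
        ((j : Nat) : Int)).getD false = cellOf matrix i j from rfl]
      have hset1 : ∀ v : Option Int,
          (pre ++ ((List.range j).map (fun c => some (pVal (cellOf matrix i) j c))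
              ++ block.drop j) ++ post).set (pre.length + j) v
            = pre ++ ((List.range j).map (fun c => some (pVal (cellOf matrix i) j c))
              ++ v :: block.drop (j + 1)) ++ post := by
        intro v
        simp only [List.append_assoc]
        rw [List.set_append_right _ _ (by omega), Nat.add_sub_cancel_left,
          List.set_append_right _ _ hMlen.le, hMlen, Nat.sub_self, hsplit]
        simp only [List.cons_append, List.set_cons_zero]
      by_cases hc : cellOf matrix i j = true
      · rw [if_pos hc]
        cases hl : lastIn (cellOf matrix i) j with
        | none =>
            simp only [prevEnc, Option.isSome_none, Bool.false_eq_true, if_false]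
            have hln : lastIn (cellOf matrix i) (j + 1) = some j := by
              rw [lastIn, if_pos hc]
            rw [hln, hidx, hset1]
            have hmap : (List.range j).map (fun c => some (pVal (cellOf matrix i) j c))
                = (List.range j).map (fun c => some (pVal (cellOf matrix i) (j + 1) c)) := by
              apply List.map_congr_left
              intro c hcmem
              rw [List.mem_range] at hcmem
              rw [pVal_succ_eq _ _ _ hcmem (Or.inr (Or.inl hl))]
            have hv : pVal (cellOf matrix i) (j + 1) j = -1 := by
              rw [pVal, if_pos hc, firstIn_eq_nil _ _ _ le_rfl]
            rw [hmap]
            simp [List.range_succ, hv, List.append_assoc]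
        | some pc =>
            simp only [prevEnc, Option.isSome_some, if_true, Option.getD_some]
            obtain ⟨hp1, hp2, hp3⟩ := lastIn_eq_some _ _ _ hl
            have hln : lastIn (cellOf matrix i) (j + 1) = some j := by
              rw [lastIn, if_pos hc]
            rw [hln, hidx, hset1]
            have hpidx : (i * n + (pc : Int)).toNat = pre.length + pc := by rw [hin]; omega
            rw [hpidx, List.append_assoc, List.set_append_right _ _ (by omega),
              Nat.add_sub_cancel_left]
            simp only [List.append_assoc]
            rw [set_map_range_append _ _ _ _ _ hp2]
            have hv : pVal (cellOf matrix i) (j + 1) j = -1 := by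
              rw [pVal, if_pos hc, firstIn_eq_nil _ _ _ le_rfl]
            have hmap : (List.range j).map
                  (fun c => if c = pc then some ((j : Nat) : Int)
                    else some (pVal (cellOf matrix i) j c))
                = (List.range j).map (fun c => some (pVal (cellOf matrix i) (j + 1) c)) := by
              apply List.map_congr_left
              intro c hcmem
              rw [List.mem_range] at hcmem
              by_cases hcp : c = pc
              · subst hcp
                rw [if_pos rfl, pVal_succ_patch _ _ _ hc hl]
              · rw [if_neg hcp, pVal_succ_eq _ _ _ hcmem]
                right; right
                rw [hl]
                intro hcontra
                exact hcp (Option.some.inj hcontra).symm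
            rw [hmap]
            simp [List.range_succ, hv, List.append_assoc]
      · rw [if_neg hc]
        have hcf : cellOf matrix i j = false := by simpa using hc
        have hln : lastIn (cellOf matrix i) (j + 1) = lastIn (cellOf matrix i) j := by
          rw [lastIn, if_neg (by simp [hcf])]
        rw [hln, hidx, hset1]
        have hmap : (List.range j).map (fun c => some (pVal (cellOf matrix i) j c))
            = (List.range j).map (fun c => some (pVal (cellOf matrix i) (j + 1) c)) := by
          apply List.map_congr_left
          intro c hcmem
          rw [List.mem_range] at hcmem
          rw [pVal_succ_eq _ _ _ hcmem (Or.inl hcf)]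
        have hv : pVal (cellOf matrix i) (j + 1) j = -1 := by
          rw [pVal, hcf]; simp
        rw [hmap]
        simp [List.range_succ, hv, List.append_assoc]

theorem aRow_eq (matrix : List (List Bool)) (n i : Int) (hn : 0 ≤ n) (hi : 0 ≤ i)
    (pre block post : List (Option Int)) (hpre : pre.length = i.toNat * n.toNat)
    (hblock : block.length = n.toNat) :
    aRow matrix n (pre ++ block ++ post) i = pre ++ rowSpecO matrix i n.toNat ++ post := by
  have h := aRow_inner matrix n i hn hi pre block post hpre hblock n.toNat le_rfl
  rw [Int.toNat_of_nonneg hn] at h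
  unfold aRow
  rw [h, show List.drop n.toNat block = [] from by rw [← hblock, List.drop_length]]
  simp [rowSpecO]

theorem outer_eq (matrix : List (List Bool)) (m n : Int) (hn : 0 ≤ n) (iN : Nat)
    (hiN : iN ≤ m.toNat) :
    (PySem.List.pyRange 0 (iN : Int) 1).foldl (aRow matrix n)
        (List.replicate (m.toNat * n.toNat) (none : Option Int))
      = ((List.range iN).map (fun k : Nat => rowSpecO matrix (k : Int) n.toNat)).flatten
          ++ List.replicate ((m.toNat - iN) * n.toNat) (none : Option Int) := by
  induction iN with
  | zero =>
      rw [show ((0 : Nat) : Int) = 0 from rfl, PySem.List.pyRange_one_eq_nil le_rfl]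
      simp
  | succ iN ih =>
      have hc1 : ((iN + 1 : Nat) : Int) = (iN : Int) + 1 := by push_cast; ring
      rw [hc1, PySem.List.pyRange_one_succ_right (by positivity), List.foldl_append,
        ih (by omega)]
      simp only [List.foldl_cons, List.foldl_nil]
      have hlen : (((List.range iN).map (fun k : Nat => rowSpecO matrix (k : Int) n.toNat)).flatten).length
          = iN * n.toNat := by
        simp only [List.length_flatten, List.map_map, Function.comp_def, rowSpecO,
          List.length_map, List.length_range]
        rw [List.map_const', List.sum_replicate, List.length_range, smul_eq_mul]
      have hrep : List.replicate ((m.toNat - iN) * n.toNat) (none : Option Int)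
          = List.replicate n.toNat (none : Option Int)
            ++ List.replicate ((m.toNat - (iN + 1)) * n.toNat) (none : Option Int) := by
        rw [← List.replicate_add]
        congr 1
        have h2 : m.toNat - iN = 1 + (m.toNat - (iN + 1)) := by omega
        rw [h2, Nat.add_mul, Nat.one_mul]
      rw [hrep, ← List.append_assoc,
        aRow_eq matrix n (iN : Int) hn (by positivity) _ _ _
          (by rw [Int.toNat_natCast]; exact hlen) (by simp)]
      rw [List.range_succ, List.map_append, List.flatten_append]
      simp [List.append_assoc]

theorem alt_eq (matrix : List (List Bool)) (m n : Int) (_hn : 0 ≤ n) :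
    createNextRightMap_alt m n matrix
      = ((List.range m.toNat).map
          (fun k : Nat => (List.range n.toNat).map (pVal (cellOf matrix (k : Int)) n.toNat))).flatten := by
  unfold createNextRightMap_alt
  rw [PySem.List.pyRange_one 0 m, Int.sub_zero, List.foldl_map,
    PySem.List.foldl_append_eq_flatMap
      (fun k : Nat => (altRowGo matrix (0 + (k : Int)) n n.toNat).2) (List.range m.toNat) [],
    List.nil_append, List.flatMap_def]
  congr 1
  apply List.map_congr_left
  intro k _
  rw [show (0 : Int) + (k : Int) = (k : Int) from by ring,
    bRow_spec matrix (k : Int) n n.toNat le_rfl, Nat.sub_self, ← List.range_eq_range']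

-- ===== VERDICT (by name: the statement is the Claim_ definition above) =====
theorem createNextRightMap_spec : Claim_equal_createNextRightMap := by
  intro m n matrix hdom hpre
  unfold Spec_createNextRightMap
  obtain ⟨hdisj, hshape⟩ := hpre
  by_cases hm : 0 ≤ m
  · by_cases hn : 0 ≤ n
    · -- main case
      have hmn : (m * n).toNat = m.toNat * n.toNat := by
        have h1 : m * n = ((m.toNat * n.toNat : Nat) : Int) := by
          have h2 : ((m.toNat * n.toNat : Nat) : Int) = (m.toNat : Int) * (n.toNat : Int) := by
            push_cast; ring
          rw [h2, Int.toNat_of_nonneg hm, Int.toNat_of_nonneg hn]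
        rw [h1, Int.toNat_natCast]
      have hA := outer_eq matrix m n hn m.toNat le_rfl
      rw [Int.toNat_of_nonneg hm] at hA
      unfold createNextRightMap
      rw [hmn, hA, Nat.sub_self, Nat.zero_mul,
        List.replicate_zero, List.append_nil, alt_eq matrix m n hn,
        List.map_flatten, List.map_map]
      congr 1
      apply List.map_congr_left
      intro k _
      simp [rowSpecO, Function.comp_def, List.map_map]
    · -- n < 0: both sides are []
      have hn' : n < 0 := by omega
      have hmn : (m * n).toNat = 0 :=
        Int.toNat_of_nonpos (mul_nonpos_of_nonneg_of_nonpos hm hn'.le)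
      have haux : ∀ (l : List Int) (arr : List (Option Int)),
          l.foldl (aRow matrix n) arr = arr := by
        intro l
        induction l with
        | nil => intro arr; rfl
        | cons x xs ihx =>
            intro arr
            rw [List.foldl_cons, show aRow matrix n arr x = arr from by
              unfold aRow
              rw [PySem.List.pyRange_one_eq_nil hn'.le]
              rfl]
            exact ihx arr
      have h0 : n.toNat = 0 := by omega
      have hrow : ∀ x : Int, (altRowGo matrix x n n.toNat).2 = [] := by
        intro x; rw [h0]; rfl
      have haux2 : ∀ (l : List Int) (out : List Int),
          l.foldl (fun out i => out ++ (altRowGo matrix i n n.toNat).2) out = out := by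
        intro l
        induction l with
        | nil => intro out; rfl
        | cons x xs ihx =>
            intro out
            rw [List.foldl_cons, hrow, List.append_nil]
            exact ihx out
      unfold createNextRightMap createNextRightMap_alt
      rw [hmn, List.replicate_zero, haux, haux2]
      rfl
  · -- m < 0, hence 0 ≤ n by Pre_; both sides are []
    have hm' : m < 0 := by omega
    have hn : 0 ≤ n := hdisj.resolve_left hm
    have hmn : (m * n).toNat = 0 :=
      Int.toNat_of_nonpos (mul_nonpos_of_nonpos_of_nonneg hm'.le hn)
    unfold createNextRightMap createNextRightMap_alt
    rw [PySem.List.pyRange_one_eq_nil hm'.le, hmn]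
    rfl
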